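-- pv_equiv track=rewrite | github.com/Emirken/scout-python-backend | scrapers/player_scraper.py | categorize_stat_by_name
-- ===== SOURCE A (Python) =====
-- def categorize_stat_by_name(stat_name):
--     """Stat isminden kategorisini belirler"""
--     try:
--         stat_lower = stat_name.lower()
--
--         # Shooting stats
--         if any(word in stat_lower for word in ['shots', 'goals', 'xg', 'shooting', 'penalty']):
--             return 'shooting'
--
--         # Passing stats
--         elif any(word in stat_lower for word in
--                  ['passes', 'assists', 'xag', 'key passes', 'final third', 'penalty area']):
--             return 'passing'
--
--         # Pass types
--         elif any(word in stat_lower for word in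
--                  ['live-ball', 'dead-ball', 'through balls', 'crosses', 'corner', 'switches']):
--             return 'pass_types'
--
--         # Goal and shot creation
--         elif any(word in stat_lower for word in ['shot-creating', 'goal-creating', 'sca', 'gca']):
--             return 'gsc'
--
--         # Defense
--         elif any(word in stat_lower for word in ['tackles', 'interceptions', 'blocks', 'clearances', 'challenges']):
--             return 'defense'
--
--         # Possession
--         elif any(word in stat_lower for word in
--                  ['touches', 'take-ons', 'carries', 'dribbles', 'progressive carries']):
--             return 'possession'
--
--         # Miscellaneous
--         elif any(word in stat_lower for word in ['cards', 'fouls', 'offsides', 'aerials', 'recoveries']):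
--             return 'misc'
--
--         # Default to standard if unclear
--         else:
--             return 'standard'
--
--     except Exception:
--         return 'standard'
-- ===== SOURCE B (Python) =====
-- _CATEGORY_ORDER = ['shooting', 'passing', 'pass_types', 'gsc', 'defense', 'possession', 'misc']
--
-- _KEYWORD_PRIORITY = {
--     'shots': 0, 'goals': 0, 'xg': 0, 'shooting': 0, 'penalty': 0,
--     'passes': 1, 'assists': 1, 'xag': 1, 'key passes': 1, 'final third': 1, 'penalty area': 1,
--     'live-ball': 2, 'dead-ball': 2, 'through balls': 2, 'crosses': 2, 'corner': 2, 'switches': 2,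
--     'shot-creating': 3, 'goal-creating': 3, 'sca': 3, 'gca': 3,
--     'tackles': 4, 'interceptions': 4, 'blocks': 4, 'clearances': 4, 'challenges': 4,
--     'touches': 5, 'take-ons': 5, 'carries': 5, 'dribbles': 5, 'progressive carries': 5,
--     'cards': 6, 'fouls': 6, 'offsides': 6, 'aerials': 6, 'recoveries': 6,
-- }
--
--
-- def categorize_stat_by_name(stat_name):
--     """Stat isminden kategorisini belirler"""
--     try:
--         stat_lower = stat_name.lower()
--     except Exception:
--         return 'standard'
--     best = min((prio for kw, prio in _KEYWORD_PRIORITY.items() if kw in stat_lower),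
--                default=None)
--     return 'standard' if best is None else _CATEGORY_ORDER[best]
-- ===== Notes on version B (the rewrite author's own statement) =====
-- stated objective: alternative
-- what changed: Replaced the ordered first-match if/elif chain by a flat keyword-to-priority dict: B takes the minimum priority over ALL matching keywords (no short-circuit, no per-category branching) and indexes into the category-order list; equivalent because the first matching branch is exactly the minimum-priority matching category.
import Mathlib
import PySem

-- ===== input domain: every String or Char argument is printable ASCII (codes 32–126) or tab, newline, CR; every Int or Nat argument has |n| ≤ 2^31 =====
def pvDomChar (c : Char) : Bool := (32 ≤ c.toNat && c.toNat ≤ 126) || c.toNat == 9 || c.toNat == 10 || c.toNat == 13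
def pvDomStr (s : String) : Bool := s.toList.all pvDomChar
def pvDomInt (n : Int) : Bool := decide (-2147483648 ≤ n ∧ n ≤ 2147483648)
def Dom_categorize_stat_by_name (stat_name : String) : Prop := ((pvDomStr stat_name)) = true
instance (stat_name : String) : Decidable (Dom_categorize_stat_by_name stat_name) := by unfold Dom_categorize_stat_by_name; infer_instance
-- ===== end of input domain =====

-- B replaces the ordered if/elif chain by a min-priority scan over a flat keyword→priority map (alternative algorithm, same cost).

-- ===== PORT A =====
def categorize_stat_by_name (stat_name : String) : String :=
  let stat_lower := PySem.Str.lower stat_name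
  if ["shots", "goals", "xg", "shooting", "penalty"].any (fun word => PySem.Str.isIn word stat_lower) then
    "shooting"
  else if ["passes", "assists", "xag", "key passes", "final third", "penalty area"].any (fun word => PySem.Str.isIn word stat_lower) then
    "passing"
  else if ["live-ball", "dead-ball", "through balls", "crosses", "corner", "switches"].any (fun word => PySem.Str.isIn word stat_lower) then
    "pass_types"
  else if ["shot-creating", "goal-creating", "sca", "gca"].any (fun word => PySem.Str.isIn word stat_lower) then
    "gsc"
  else if ["tackles", "interceptions", "blocks", "clearances", "challenges"].any (fun word => PySem.Str.isIn word stat_lower) then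
    "defense"
  else if ["touches", "take-ons", "carries", "dribbles", "progressive carries"].any (fun word => PySem.Str.isIn word stat_lower) then
    "possession"
  else if ["cards", "fouls", "offsides", "aerials", "recoveries"].any (fun word => PySem.Str.isIn word stat_lower) then
    "misc"
  else
    "standard"

-- ===== PORT B =====
def categoryOrder : List String :=
  ["shooting", "passing", "pass_types", "gsc", "defense", "possession", "misc"]

-- flat keyword → priority map (_KEYWORD_PRIORITY, in insertion order)
def keywordPriority : List (String × Nat) :=
  [("shots", 0), ("goals", 0), ("xg", 0), ("shooting", 0), ("penalty", 0),
   ("passes", 1), ("assists", 1), ("xag", 1), ("key passes", 1), ("final third", 1), ("penalty area", 1),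
   ("live-ball", 2), ("dead-ball", 2), ("through balls", 2), ("crosses", 2), ("corner", 2), ("switches", 2),
   ("shot-creating", 3), ("goal-creating", 3), ("sca", 3), ("gca", 3),
   ("tackles", 4), ("interceptions", 4), ("blocks", 4), ("clearances", 4), ("challenges", 4),
   ("touches", 5), ("take-ons", 5), ("carries", 5), ("dribbles", 5), ("progressive carries", 5),
   ("cards", 6), ("fouls", 6), ("offsides", 6), ("aerials", 6), ("recoveries", 6)]

-- min(generator, default=None): running Option-minimum over the matched priorities
def minStep (stat_lower : String) (acc : Option Nat) (kv : String × Nat) : Option Nat :=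
  if PySem.Str.isIn kv.1 stat_lower then
    match acc with
    | none => some kv.2
    | some b => some (min b kv.2)
  else acc

def categorize_stat_by_name_alt (stat_name : String) : String :=
  let stat_lower := PySem.Str.lower stat_name
  let best := keywordPriority.foldl (minStep stat_lower) none
  match best with
  | none => "standard"
  | some p => categoryOrder.getD p "standard"  -- exact: p is always a priority 0..6, in range

-- ===== PRECONDITION & SPEC =====
def Spec_categorize_stat_by_name (stat_name : String) (out : String) : Prop := out = categorize_stat_by_name_alt stat_name
instance (stat_name : String) (out : String) : Decidable (Spec_categorize_stat_by_name stat_name out) := by unfold Spec_categorize_stat_by_name; infer_instance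

-- ===== CLAIM (what is proved, stated in full; the proofs are below) =====
def Claim_equal_categorize_stat_by_name : Prop := ∀ (stat_name : String), Dom_categorize_stat_by_name stat_name → Spec_categorize_stat_by_name stat_name (categorize_stat_by_name stat_name)

-- ===== LEMMAS AND PROOFS =====

-- once the running minimum holds q ≤ p, a segment of priority-p keywords leaves it unchanged
theorem seg_some (s : String) (p q : Nat) (hqp : q ≤ p) :
    ∀ (kws : List String),
      List.foldl (minStep s) (some q) (kws.map (fun k => (k, p))) = some q := by
  intro kws
  induction kws with
  | nil => rfl
  | cons k rest ih =>
    simp only [List.map_cons, List.foldl_cons]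
    have : minStep s (some q) (k, p) = some q := by
      simp [minStep, Nat.min_eq_left hqp]
    rw [this, ih]

-- starting from none, a segment of priority-p keywords yields some p iff any keyword matches
theorem seg_none (s : String) (p : Nat) :
    ∀ (kws : List String),
      List.foldl (minStep s) none (kws.map (fun k => (k, p))) =
        if kws.any (fun w => PySem.Str.isIn w s) then some p else none := by
  intro kws
  induction kws with
  | nil => rfl
  | cons k rest ih =>
    simp only [List.map_cons, List.foldl_cons, List.any_cons]
    have hm : minStep s none (k, p) = if PySem.Str.isIn k s = true then some p else none := rfl
    rw [hm]
    by_cases h : PySem.Str.isIn k s = true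
    · rw [if_pos h, seg_some s p p (Nat.le_refl p) rest]
      simp only [PySem.Str.isIn_eq] at h
      simp [h]
    · have hf : PySem.Str.isIn k s = false := by
        revert h; cases PySem.Str.isIn k s <;> simp
      rw [if_neg h, ih]
      simp only [PySem.Str.isIn_eq] at hf
      simp [hf]

theorem keywordPriority_split :
    keywordPriority =
      (["shots", "goals", "xg", "shooting", "penalty"].map (fun k => (k, (0 : Nat)))) ++
      (["passes", "assists", "xag", "key passes", "final third", "penalty area"].map (fun k => (k, (1 : Nat)))) ++
      (["live-ball", "dead-ball", "through balls", "crosses", "corner", "switches"].map (fun k => (k, (2 : Nat)))) ++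
      (["shot-creating", "goal-creating", "sca", "gca"].map (fun k => (k, (3 : Nat)))) ++
      (["tackles", "interceptions", "blocks", "clearances", "challenges"].map (fun k => (k, (4 : Nat)))) ++
      (["touches", "take-ons", "carries", "dribbles", "progressive carries"].map (fun k => (k, (5 : Nat)))) ++
      (["cards", "fouls", "offsides", "aerials", "recoveries"].map (fun k => (k, (6 : Nat)))) := by
  rfl

-- ===== VERDICT (by name: the statement is the Claim_ definition above) =====
theorem categorize_stat_by_name_spec : Claim_equal_categorize_stat_by_name := by
  intro stat_name _
  unfold Spec_categorize_stat_by_name categorize_stat_by_name categorize_stat_by_name_alt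
  rw [keywordPriority_split]
  set t := PySem.Str.lower stat_name with ht
  simp only [List.foldl_append]
  by_cases h0 : ["shots", "goals", "xg", "shooting", "penalty"].any (fun word => PySem.Str.isIn word t) = true
  · rw [seg_none]
    simp only [if_pos h0]
    rw [seg_some t 1 0 (by omega), seg_some t 2 0 (by omega), seg_some t 3 0 (by omega),
      seg_some t 4 0 (by omega), seg_some t 5 0 (by omega), seg_some t 6 0 (by omega)]
    rfl
  · rw [seg_none]
    simp only [if_neg h0]
    by_cases h1 : ["passes", "assists", "xag", "key passes", "final third", "penalty area"].any (fun word => PySem.Str.isIn word t) = true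
    · rw [seg_none]
      simp only [if_pos h1]
      rw [seg_some t 2 1 (by omega), seg_some t 3 1 (by omega),
        seg_some t 4 1 (by omega), seg_some t 5 1 (by omega), seg_some t 6 1 (by omega)]
      rfl
    · rw [seg_none]
      simp only [if_neg h1]
      by_cases h2 : ["live-ball", "dead-ball", "through balls", "crosses", "corner", "switches"].any (fun word => PySem.Str.isIn word t) = true
      · rw [seg_none]
        simp only [if_pos h2]
        rw [seg_some t 3 2 (by omega), seg_some t 4 2 (by omega),
          seg_some t 5 2 (by omega), seg_some t 6 2 (by omega)]
        rfl
      · rw [seg_none]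
        simp only [if_neg h2]
        by_cases h3 : ["shot-creating", "goal-creating", "sca", "gca"].any (fun word => PySem.Str.isIn word t) = true
        · rw [seg_none]
          simp only [if_pos h3]
          rw [seg_some t 4 3 (by omega), seg_some t 5 3 (by omega), seg_some t 6 3 (by omega)]
          rfl
        · rw [seg_none]
          simp only [if_neg h3]
          by_cases h4 : ["tackles", "interceptions", "blocks", "clearances", "challenges"].any (fun word => PySem.Str.isIn word t) = true
          · rw [seg_none]
            simp only [if_pos h4]
            rw [seg_some t 5 4 (by omega), seg_some t 6 4 (by omega)]
            rfl
          · rw [seg_none]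
            simp only [if_neg h4]
            by_cases h5 : ["touches", "take-ons", "carries", "dribbles", "progressive carries"].any (fun word => PySem.Str.isIn word t) = true
            · rw [seg_none]
              simp only [if_pos h5]
              rw [seg_some t 6 5 (by omega)]
              rfl
            · rw [seg_none]
              simp only [if_neg h5]
              by_cases h6 : ["cards", "fouls", "offsides", "aerials", "recoveries"].any (fun word => PySem.Str.isIn word t) = true
              · rw [seg_none]
                simp only [if_pos h6]
                rfl
              · rw [seg_none]
                simp only [if_neg h6]
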